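-- pv_equiv track=rewrite | github.com/rsp2k/video-processor | src/video_processor/video_360/spatial_audio.py | _has_binaural_metadata
-- ===== SOURCE A (Python) =====
-- def _has_binaural_metadata(tags: dict) -> bool:
--     """Check for binaural audio metadata."""
--     binaural_indicators = [
--         "binaural",
--         "hrtf",
--         "head_related",
--         "3d_audio",
--         "immersive_stereo",
--     ]
--
--     for tag_name, tag_value in tags.items():
--         tag_str = str(tag_value).lower()
--         if any(indicator in tag_str for indicator in binaural_indicators):
--             return True
--
--     return False
-- ===== SOURCE B (Python) =====
-- def _has_binaural_metadata(tags: dict) -> bool: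
--     """Check for binaural audio metadata (single scan over one joined blob)."""
--     # Newline cannot occur in any indicator, so joining with '\n' creates no
--     # spurious cross-value matches.
--     blob = "\n".join(str(v).lower() for v in tags.values())
--     return any(
--         indicator in blob
--         for indicator in ("binaural", "hrtf", "head_related", "3d_audio", "immersive_stereo")
--     )
-- ===== Notes on version B (the rewrite author's own statement) =====
-- stated objective: alternative
-- what changed: B concatenates all lowered tag values into one newline-joined blob and runs each of the five substring tests once over that single string, instead of A's per-value loop with an inner any() and early return; correctness rests on the separator '\n' not occurring in any indicator, so no match can span a value boundary.
import Mathlib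
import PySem

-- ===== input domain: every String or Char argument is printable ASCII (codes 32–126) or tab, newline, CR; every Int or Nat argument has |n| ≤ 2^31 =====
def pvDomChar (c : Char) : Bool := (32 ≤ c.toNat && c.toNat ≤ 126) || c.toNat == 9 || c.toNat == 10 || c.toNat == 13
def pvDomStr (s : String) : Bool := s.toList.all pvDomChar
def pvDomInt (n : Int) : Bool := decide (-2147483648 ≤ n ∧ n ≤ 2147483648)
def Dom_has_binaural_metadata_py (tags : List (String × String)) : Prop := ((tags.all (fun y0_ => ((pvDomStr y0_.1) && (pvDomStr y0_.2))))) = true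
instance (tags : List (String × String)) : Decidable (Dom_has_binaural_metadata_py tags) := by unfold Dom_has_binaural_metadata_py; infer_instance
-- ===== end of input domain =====

-- B joins all lowered tag values into one '\n'-separated blob and tests each of the five
-- indicators once against that single string (A loops values with an inner any and early return);
-- '\n' occurs in no indicator, so no match can cross a value boundary (alternative, same cost).


-- ===== PORT A =====
-- Port of A: loop over tag items, lower each value, early-return True if any of the
-- five indicators is a substring; List.any is the loop-with-early-return.
def has_binaural_metadata_py (tags : List (String × String)) : Bool :=
  let binaural_indicators : List String :=
    ["binaural", "hrtf", "head_related", "3d_audio", "immersive_stereo"]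
  tags.any (fun kv =>
    let tag_str := PySem.Str.lower kv.2
    binaural_indicators.any (fun indicator => PySem.Str.isIn indicator tag_str))

-- ===== PORT B =====
-- Port of B: join all lowered values with '\n' into one blob, then one substring
-- test per indicator over that blob.
def has_binaural_metadata_py_alt (tags : List (String × String)) : Bool :=
  let blob := PySem.Str.join "\n" (tags.map (fun kv => PySem.Str.lower kv.2))
  (["binaural", "hrtf", "head_related", "3d_audio", "immersive_stereo"] : List String).any
    (fun indicator => PySem.Str.isIn indicator blob)

-- ===== PRECONDITION & SPEC =====
def Spec_has_binaural_metadata_py (tags : List (String × String)) (out : Bool) : Prop := out = has_binaural_metadata_py_alt tags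
instance (tags : List (String × String)) (out : Bool) : Decidable (Spec_has_binaural_metadata_py tags out) := by unfold Spec_has_binaural_metadata_py; infer_instance

-- ===== CLAIM (what is proved, stated in full; the proofs are below) =====
def Claim_equal_has_binaural_metadata_py : Prop := ∀ (tags : List (String × String)), Dom_has_binaural_metadata_py tags → Spec_has_binaural_metadata_py tags (has_binaural_metadata_py tags)

-- ===== LEMMAS AND PROOFS =====

-- A '\n'-free needle is an infix of xs ++ '\n' :: ys iff it is an infix of one side:
-- it cannot straddle the separator without containing it.
lemma infix_split {needle xs ys : List Char} (hnl : '\n' ∉ needle) :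
    needle <:+: xs ++ '\n' :: ys ↔ needle <:+: xs ∨ needle <:+: ys := by
  constructor
  · rintro ⟨s, t, hst⟩
    rw [List.append_assoc] at hst
    by_cases hle : s.length + needle.length ≤ xs.length
    · left
      have h := congrArg (List.take xs.length) hst
      rw [show s ++ (needle ++ t) = (s ++ needle) ++ t by simp] at h
      rw [List.take_append, List.take_of_length_le (by simp; omega)] at h
      rw [List.take_append, List.take_of_length_le (le_refl _)] at h
      simp at h
      exact ⟨s, t.take (xs.length - (s.length + needle.length)), by
        rw [List.append_assoc]; exact h⟩
    · by_cases hs : xs.length + 1 ≤ s.length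
      · right
        have h := congrArg (List.drop (xs.length + 1)) hst
        rw [List.drop_append_of_le_length hs] at h
        rw [show xs ++ '\n' :: ys = (xs ++ ['\n']) ++ ys by simp] at h
        rw [List.drop_append_of_le_length (by simp)] at h
        simp at h
        exact ⟨s.drop (xs.length + 1), t, by rw [← List.append_assoc] at h; exact h⟩
      · exfalso
        simp only [not_le] at hs hle
        have hlen : xs.length < (s ++ (needle ++ t)).length := by simp; omega
        have h1 : (s ++ (needle ++ t))[xs.length]'hlen = '\n' := by
          rw [List.getElem_of_eq hst]
          rw [List.getElem_append_right (by omega)]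
          simp
        rw [List.getElem_append_right (by omega)] at h1
        rw [List.getElem_append_left (by omega)] at h1
        exact hnl (h1 ▸ List.getElem_mem _)
  · rintro (⟨s,t,h⟩ | ⟨s,t,h⟩)
    · exact ⟨s, t ++ '\n' :: ys, by rw [← h]; simp⟩
    · exact ⟨xs ++ '\n' :: s, t, by rw [← h]; simp⟩

-- A nonempty '\n'-free needle is an infix of the '\n'-join of chunks iff it is an
-- infix of some chunk.
lemma infix_join {needle : List Char} (hne : needle ≠ []) (hnl : '\n' ∉ needle) :
    ∀ chunks : List (List Char),
      (needle <:+: PySem.Chars.join ['\n'] chunks ↔ ∃ c ∈ chunks, needle <:+: c)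
  | [] => by
    rw [PySem.Chars.join_nil]
    simp [List.infix_nil, hne]
  | [c] => by
    rw [PySem.Chars.join_singleton]
    simp
  | c :: c' :: rest => by
    rw [PySem.Chars.join_cons_cons,
        show c ++ ['\n'] ++ PySem.Chars.join ['\n'] (c' :: rest)
           = c ++ '\n' :: PySem.Chars.join ['\n'] (c' :: rest) by simp,
        infix_split hnl, infix_join hne hnl (c' :: rest)]
    simp

-- The blob test for one indicator equals the per-value scan for that indicator.
lemma isIn_blob (ind : String) (hne : ind.toList ≠ []) (hnl : '\n' ∉ ind.toList)
    (tags : List (String × String)) :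
    PySem.Str.isIn ind (PySem.Str.join "\n" (tags.map (fun kv => PySem.Str.lower kv.2))) = true
      ↔ ∃ kv ∈ tags, PySem.Str.isIn ind (PySem.Str.lower kv.2) = true := by
  rw [PySem.Str.isIn_iff_infix, PySem.Str.toList_join]
  have hsep : ("\n" : String).toList = ['\n'] := rfl
  rw [hsep, infix_join hne hnl]
  constructor
  · rintro ⟨c, hc, hinf⟩
    simp only [List.map_map, List.mem_map, Function.comp] at hc
    obtain ⟨kv, hkv, rfl⟩ := hc
    exact ⟨kv, hkv, (PySem.Str.isIn_iff_infix _ _).2 hinf⟩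
  · rintro ⟨kv, hkv, h⟩
    refine ⟨(PySem.Str.lower kv.2).toList, ?_, (PySem.Str.isIn_iff_infix _ _).1 h⟩
    simp only [List.map_map, List.mem_map, Function.comp]
    exact ⟨kv, hkv, rfl⟩

-- ===== VERDICT (by name: the statement is the Claim_ definition above) =====
theorem has_binaural_metadata_py_spec : Claim_equal_has_binaural_metadata_py := by
  intro tags _
  unfold Spec_has_binaural_metadata_py
  unfold has_binaural_metadata_py has_binaural_metadata_py_alt
  rw [Bool.eq_iff_iff]
  simp only [List.any_eq_true]
  constructor
  · rintro ⟨kv, hkv, hin⟩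
    obtain ⟨ind, hind, h⟩ := hin
    refine ⟨ind, hind, ?_⟩
    have hne : ind.toList ≠ [] := by
      fin_cases hind <;> decide
    have hnl : '\n' ∉ ind.toList := by
      fin_cases hind <;> decide
    exact (isIn_blob ind hne hnl tags).2 ⟨kv, hkv, h⟩
  · rintro ⟨ind, hind, h⟩
    have hne : ind.toList ≠ [] := by
      fin_cases hind <;> decide
    have hnl : '\n' ∉ ind.toList := by
      fin_cases hind <;> decide
    obtain ⟨kv, hkv, hin⟩ := (isIn_blob ind hne hnl tags).1 h
    exact ⟨kv, hkv, ind, hind, hin⟩
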